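-- pv_equiv track=rewrite | github.com/aniemerg/willitmerge-bot | src/ml/features.py | _branch_prefix
-- ===== SOURCE A (Python) =====
-- BRANCH_PREFIXES = ["fix", "feat", "feature", "chore", "docs", "refactor", "test",
--                    "hotfix", "bug", "perf", "style", "ci", "build", "revert"]
--
-- def _branch_prefix(ref_name: str) -> int:
--     """Return index into BRANCH_PREFIXES list, or len(BRANCH_PREFIXES) for 'other'."""
--     if not ref_name:
--         return len(BRANCH_PREFIXES)
--     lower = ref_name.lower()
--     for i, prefix in enumerate(BRANCH_PREFIXES):
--         if lower.startswith(prefix + "/") or lower.startswith(prefix + "-"):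
--             return i
--     return len(BRANCH_PREFIXES)
-- ===== SOURCE B (Python) =====
-- BRANCH_PREFIXES = ["fix", "feat", "feature", "chore", "docs", "refactor", "test",
--                    "hotfix", "bug", "perf", "style", "ci", "build", "revert"]
--
-- PREFIX_INDEX = {p: i for i, p in enumerate(BRANCH_PREFIXES)}
--
--
-- def _branch_prefix(ref_name: str) -> int:
--     """Return index into BRANCH_PREFIXES list, or len(BRANCH_PREFIXES) for 'other'."""
--     seg = []
--     for ch in ref_name.lower():
--         if ch == '/' or ch == '-':
--             return PREFIX_INDEX.get(''.join(seg), len(BRANCH_PREFIXES))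
--         seg.append(ch)
--     return len(BRANCH_PREFIXES)
-- ===== Notes on version B (the rewrite author's own statement) =====
-- stated objective: alternative
-- what changed: Replaces A's scan over the 14-prefix list with two startswith tests per prefix by a single pass over the characters up to the first '/' or '-' and one lookup of that segment in a precomputed prefix-to-index dict.
import Mathlib
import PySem

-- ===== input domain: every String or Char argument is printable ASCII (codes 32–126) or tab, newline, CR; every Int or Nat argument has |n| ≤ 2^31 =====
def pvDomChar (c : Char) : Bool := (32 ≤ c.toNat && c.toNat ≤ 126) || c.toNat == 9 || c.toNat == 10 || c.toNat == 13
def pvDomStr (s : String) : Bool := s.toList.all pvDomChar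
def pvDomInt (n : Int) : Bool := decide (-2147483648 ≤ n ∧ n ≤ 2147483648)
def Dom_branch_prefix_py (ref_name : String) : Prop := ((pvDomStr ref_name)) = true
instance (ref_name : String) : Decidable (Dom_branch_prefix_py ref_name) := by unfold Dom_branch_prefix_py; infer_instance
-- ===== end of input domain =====

-- B replaces A's scan over the prefix list (two startswith tests per prefix) by a single pass over
-- the characters up to the first '/' or '-' plus one lookup of that segment in a precomputed
-- prefix→index dict (objective: alternative decomposition, similar cost on these short inputs).

-- ===== PORT A =====
def BRANCH_PREFIXES : List String :=
  ["fix", "feat", "feature", "chore", "docs", "refactor", "test",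
   "hotfix", "bug", "perf", "style", "ci", "build", "revert"]

-- the 'for i, prefix in enumerate(BRANCH_PREFIXES)' loop with its two startswith tests
def pvALoop (lower : String) : List (Int × String) → Int
  | [] => (BRANCH_PREFIXES.length : Int)
  | (i, p) :: rest =>
    if PySem.Str.startswith lower (p ++ "/") || PySem.Str.startswith lower (p ++ "-") then i
    else pvALoop lower rest

def branch_prefix_py (ref_name : String) : Int :=
  if ref_name = "" then (BRANCH_PREFIXES.length : Int)
  else pvALoop (PySem.Str.lower ref_name) (PySem.List.enumerate BRANCH_PREFIXES)

-- ===== PORT B =====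
-- PREFIX_INDEX = {p: i for i, p in enumerate(BRANCH_PREFIXES)}
def PREFIX_INDEX : PySem.Dict String Int :=
  (PySem.List.enumerate BRANCH_PREFIXES).foldl (fun d ip => d.insert ip.2 ip.1) PySem.Dict.empty

-- the 'for ch in lower' loop; seg is the accumulated list of chars, ''.join(seg) = String.ofList seg
def pvBLoop (seg : List Char) : List Char → Int
  | [] => (BRANCH_PREFIXES.length : Int)
  | c :: rest =>
    if c = '/' ∨ c = '-' then
      PREFIX_INDEX.getD (String.ofList seg) (BRANCH_PREFIXES.length : Int)
    else pvBLoop (seg ++ [c]) rest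

def branch_prefix_py_alt (ref_name : String) : Int :=
  pvBLoop [] (PySem.Str.lower ref_name).toList

-- ===== PRECONDITION & SPEC =====
def Spec_branch_prefix_py (ref_name : String) (out : Int) : Prop := out = branch_prefix_py_alt ref_name
instance (ref_name : String) (out : Int) : Decidable (Spec_branch_prefix_py ref_name out) := by unfold Spec_branch_prefix_py; infer_instance

-- ===== CLAIM (what is proved, stated in full; the proofs are below) =====
def Claim_equal_branch_prefix_py : Prop := ∀ (ref_name : String), Dom_branch_prefix_py ref_name → Spec_branch_prefix_py ref_name (branch_prefix_py ref_name)

-- ===== LEMMAS AND PROOFS =====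

-- the segment of l before its first '/' or '-', if l contains such a separator
def firstSeg? : List Char → Option (List Char)
  | [] => none
  | c :: cs => if c = '/' ∨ c = '-' then some [] else (firstSeg? cs).map (c :: ·)

-- B's loop returns the lookup of acc ++ (first segment), or len(BRANCH_PREFIXES) with no separator
theorem pvBLoop_eq (l : List Char) : ∀ acc, pvBLoop acc l =
    match firstSeg? l with
    | none => (BRANCH_PREFIXES.length : Int)
    | some s => PREFIX_INDEX.getD (String.ofList (acc ++ s)) (BRANCH_PREFIXES.length : Int) := by
  induction l with
  | nil => intro acc; rfl
  | cons c cs ih =>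
    intro acc
    by_cases h : c = '/' ∨ c = '-' <;> simp [pvBLoop, firstSeg?, h, ih (acc ++ [c])]
    cases firstSeg? cs <;> simp

-- A's startswith(prefix+'/') / startswith(prefix+'-') test, for a separator-free prefix p,
-- holds exactly when the segment before the first separator of l is p
theorem start_iff (l : List Char) : ∀ p : List Char, (∀ c ∈ p, ¬(c = '/' ∨ c = '-')) →
    (((p ++ ['/']) <+: l ∨ (p ++ ['-']) <+: l) ↔ firstSeg? l = some p) := by
  induction l with
  | nil => intro p _; simp [firstSeg?]
  | cons c cs ih =>
    intro p hp
    cases p with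
    | nil =>
      by_cases h : c = '/' ∨ c = '-'
      · simp [firstSeg?, h, List.cons_prefix_cons]
        rcases h with h | h <;> simp [h]
      · simp [firstSeg?, h, List.cons_prefix_cons]
        exact ⟨fun e => h (Or.inl e.symm), fun e => h (Or.inr e.symm)⟩
    | cons a p' =>
      have ha : ¬(a = '/' ∨ a = '-') := hp a (by simp)
      have hp' : ∀ c ∈ p', ¬(c = '/' ∨ c = '-') := fun c hc => hp c (by simp [hc])
      by_cases h : c = '/' ∨ c = '-'
      · have hac : ¬ a = c := fun e => ha (e ▸ h)
        simp [firstSeg?, h, List.cons_prefix_cons, hac]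
      · simp [firstSeg?, h, List.cons_prefix_cons, ← ih p' hp']
        constructor
        · rintro (⟨he, hpre⟩ | ⟨he, hpre⟩)
          · exact ⟨Or.inl hpre, he.symm⟩
          · exact ⟨Or.inr hpre, he.symm⟩
        · rintro ⟨hpre | hpre, he⟩
          · exact Or.inl ⟨he.symm, hpre⟩
          · exact Or.inr ⟨he.symm, hpre⟩

theorem beq_ofList (u : String) (t : List Char) : (u == String.ofList t) = decide (t = u.toList) := by
  rw [Bool.eq_iff_iff, beq_iff_eq, decide_eq_true_iff]
  constructor
  · intro h; rw [h]; simp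
  · intro h; rw [h]; simp

-- with a separator present, A's scan over the concrete prefix list is exactly B's dict lookup
set_option maxHeartbeats 1000000 in
theorem segCase (l s : List Char) (hs : firstSeg? l = some s) :
    pvALoop (String.ofList l) (PySem.List.enumerate BRANCH_PREFIXES) =
    PREFIX_INDEX.getD (String.ofList s) (BRANCH_PREFIXES.length : Int) := by
  have key : ∀ (u : String), (∀ c ∈ u.toList, ¬(c = '/' ∨ c = '-')) →
      (PySem.Str.startswith (String.ofList l) (u ++ "/") || PySem.Str.startswith (String.ofList l) (u ++ "-")) = decide (s = u.toList) := by
    intro u hu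
    rw [Bool.eq_iff_iff]
    simp only [Bool.or_eq_true, PySem.Str.startswith_eq, String.toList_ofList, String.toList_append,
      PySem.Chars.startswith_iff, decide_eq_true_iff]
    rw [show ("/" : String).toList = ['/'] from rfl, show ("-" : String).toList = ['-'] from rfl]
    rw [start_iff l u.toList hu, hs]
    exact Option.some_inj
  rw [show PySem.List.enumerate BRANCH_PREFIXES = [((0:Int),"fix"), ((1:Int),"feat"), ((2:Int),"feature"), ((3:Int),"chore"), ((4:Int),"docs"), ((5:Int),"refactor"), ((6:Int),"test"), ((7:Int),"hotfix"), ((8:Int),"bug"), ((9:Int),"perf"), ((10:Int),"style"), ((11:Int),"ci"), ((12:Int),"build"), ((13:Int),"revert")] from rfl]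
  simp only [pvALoop]
  rw [key "fix" (by simp), key "feat" (by simp), key "feature" (by simp), key "chore" (by simp), key "docs" (by simp), key "refactor" (by simp), key "test" (by simp), key "hotfix" (by simp), key "bug" (by simp), key "perf" (by simp), key "style" (by simp), key "ci" (by simp), key "build" (by simp), key "revert" (by simp)]
  rw [show PREFIX_INDEX = PySem.Dict.mk [("fix",(0:Int)), ("feat",(1:Int)), ("feature",(2:Int)), ("chore",(3:Int)), ("docs",(4:Int)), ("refactor",(5:Int)), ("test",(6:Int)), ("hotfix",(7:Int)), ("bug",(8:Int)), ("perf",(9:Int)), ("style",(10:Int)), ("ci",(11:Int)), ("build",(12:Int)), ("revert",(13:Int))] from rfl]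
  simp only [PySem.Dict.getD, PySem.Dict.get?_mk_cons, beq_ofList]
  simp only [apply_ite (fun o : Option Int => o.getD ((BRANCH_PREFIXES.length : Nat) : Int)), Option.getD_some]
  rfl

-- with no separator anywhere in l, every one of A's startswith tests fails
theorem noneCase (l : List Char) (hs : firstSeg? l = none) :
    pvALoop (String.ofList l) (PySem.List.enumerate BRANCH_PREFIXES) = (BRANCH_PREFIXES.length : Int) := by
  have key : ∀ (u : String), (∀ c ∈ u.toList, ¬(c = '/' ∨ c = '-')) →
      (PySem.Str.startswith (String.ofList l) (u ++ "/") || PySem.Str.startswith (String.ofList l) (u ++ "-")) = false := by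
    intro u hu
    rw [Bool.eq_false_iff]
    intro hc
    simp only [Bool.or_eq_true, PySem.Str.startswith_eq, String.toList_ofList, String.toList_append,
      PySem.Chars.startswith_iff] at hc
    rw [show ("/" : String).toList = ['/'] from rfl, show ("-" : String).toList = ['-'] from rfl] at hc
    rw [start_iff l u.toList hu, hs] at hc
    simp at hc
  rw [show PySem.List.enumerate BRANCH_PREFIXES = [((0:Int),"fix"), ((1:Int),"feat"), ((2:Int),"feature"), ((3:Int),"chore"), ((4:Int),"docs"), ((5:Int),"refactor"), ((6:Int),"test"), ((7:Int),"hotfix"), ((8:Int),"bug"), ((9:Int),"perf"), ((10:Int),"style"), ((11:Int),"ci"), ((12:Int),"build"), ((13:Int),"revert")] from rfl]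
  simp only [pvALoop]
  rw [key "fix" (by simp), key "feat" (by simp), key "feature" (by simp), key "chore" (by simp), key "docs" (by simp), key "refactor" (by simp), key "test" (by simp), key "hotfix" (by simp), key "bug" (by simp), key "perf" (by simp), key "style" (by simp), key "ci" (by simp), key "build" (by simp), key "revert" (by simp)]
  simp

-- ===== VERDICT (by name: the statement is the Claim_ definition above) =====
theorem branch_prefix_py_spec : Claim_equal_branch_prefix_py := by
  intro ref_name _
  unfold Spec_branch_prefix_py branch_prefix_py branch_prefix_py_alt
  by_cases he : ref_name = ""
  · subst he
    simp [pvBLoop, PySem.Str.lower, PySem.Chars.lower]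
  · rw [if_neg he]
    rw [pvBLoop_eq]
    have hl : PySem.Str.lower ref_name = String.ofList (PySem.Str.lower ref_name).toList := String.ofList_toList.symm
    cases hs : firstSeg? (PySem.Str.lower ref_name).toList with
    | none => rw [hl, noneCase _ hs]
    | some s => rw [hl, segCase _ s hs]; simp
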